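-- pv_equiv track=rewrite | github.com/glueckf/INES | src/prepp.py | determine_permutations_of_all_relevant_lengths
-- ===== SOURCE A (Python) =====
-- from itertools import chain, combinations
--
-- def determine_permutations_of_all_relevant_lengths(
--     eventtypes, start_length=2, end_length=7
-- ):
--     "[A,B,C] --> [], [A], [B], [C], [A,B], [A,C], [B,C], [A,B,C]"
--     result = []
--     for current_subset in chain.from_iterable(
--         combinations(eventtypes, it) for it in range(start_length, end_length + 1)
--     ):
--         result.append("".join(current_subset))
--
--     return result
-- ===== SOURCE B (Python) =====
-- def determine_permutations_of_all_relevant_lengths(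
--     eventtypes, start_length=2, end_length=7
-- ):
--     "[A,B,C] --> [], [A], [B], [C], [A,B], [A,C], [B,C], [A,B,C]"
--     items = list(eventtypes)
--     if start_length > end_length:
--         return []
--     if start_length < 0:
--         raise ValueError("combination length must be non-negative")
--     maxr = min(end_length, len(items))
--     # table[r] = joined r-combinations of the suffix processed so far
--     table = [[""]] + [[] for _ in range(maxr)]
--     for x in reversed(items):
--         table = [table[0]] + [
--             [x + c for c in table[r - 1]] + table[r] for r in range(1, len(table))
--         ]
--     result = []
--     for r in range(start_length, maxr + 1):
--         result += table[r]
--     return result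
-- ===== Notes on version B (the rewrite author's own statement) =====
-- stated objective: alternative
-- what changed: Replaces the itertools chain/combinations pipeline (enumerating tuples per length and joining each) with a single right-to-left dynamic-programming pass that maintains a table of joined combination strings per length, capped at min(end_length, len(eventtypes)).
import Mathlib
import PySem

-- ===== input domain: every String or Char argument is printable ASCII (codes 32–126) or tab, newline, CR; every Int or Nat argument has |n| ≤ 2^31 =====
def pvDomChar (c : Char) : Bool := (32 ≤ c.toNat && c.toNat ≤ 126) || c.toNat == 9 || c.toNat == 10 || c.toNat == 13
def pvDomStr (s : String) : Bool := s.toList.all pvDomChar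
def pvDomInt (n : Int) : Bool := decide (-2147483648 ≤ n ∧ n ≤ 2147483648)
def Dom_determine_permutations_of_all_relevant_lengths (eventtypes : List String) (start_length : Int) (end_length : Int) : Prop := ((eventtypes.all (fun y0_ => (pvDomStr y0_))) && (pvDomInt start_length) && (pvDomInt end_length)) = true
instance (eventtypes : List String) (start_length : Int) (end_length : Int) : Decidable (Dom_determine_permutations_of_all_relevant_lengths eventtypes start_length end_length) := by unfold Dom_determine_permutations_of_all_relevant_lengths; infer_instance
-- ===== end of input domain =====

-- ===== PORT A =====
-- B replaces the per-length combinations pipeline with one right-to-left DP pass; on a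
-- negative requested length both Pythons raise ValueError (excluded by Pre_).
-- combinations(xs, r) in itertools' index-lexicographic order (combos containing the head first).
def combA : Nat → List String → List (List String)
  | 0, _ => [[]]
  | _+1, [] => []
  | r+1, x::xs => ((combA r xs).map (fun c => x :: c)) ++ combA (r+1) xs

def determine_permutations_of_all_relevant_lengths (eventtypes : List String) (start_length : Int) (end_length : Int) : List String :=
  (PySem.List.pyRange start_length (end_length + 1) 1).foldl
    (fun result it => result ++ (combA it.toNat eventtypes).map (fun c => PySem.Str.join "" c)) []

-- ===== PORT B =====
-- Source B's inner comprehension: from row table[r-1] (prev) and the remaining rows, build the new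
-- rows [x + c for c in table[r-1]] + table[r] for r = 1 .. len(table)-1.
def stepRow (x : String) : List String → List (List String) → List (List String)
  | _, [] => []
  | prev, t :: ts => ((prev.map (fun c => x ++ c)) ++ t) :: stepRow x t ts

-- Source B's per-element table update: table = [table[0]] + [...].
def stepTable (x : String) (table : List (List String)) : List (List String) :=
  match table with
  | [] => []
  | t0 :: ts => t0 :: stepRow x t0 ts

def determine_permutations_of_all_relevant_lengths_alt (eventtypes : List String) (start_length : Int) (end_length : Int) : List String :=
  if end_length < start_length then []
  else
    let maxr : Nat := (min end_length (eventtypes.length : Int)).toNat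
    let table := eventtypes.reverse.foldl (fun t x => stepTable x t) ([""] :: List.replicate maxr [])
    (PySem.List.pyRange start_length ((maxr : Int) + 1) 1).foldl
      (fun result r => result ++ table.getD r.toNat []) []

-- ===== PRECONDITION & SPEC =====
-- Pre_ excludes exactly the inputs where the loop requests a negative combination length:
-- there itertools.combinations (and B's explicit check) raises ValueError, so A returns nothing.
def Pre_determine_permutations_of_all_relevant_lengths (eventtypes : List String) (start_length : Int) (end_length : Int) : Prop :=
  0 ≤ start_length ∨ end_length < start_length
instance (eventtypes : List String) (start_length : Int) (end_length : Int) : Decidable (Pre_determine_permutations_of_all_relevant_lengths eventtypes start_length end_length) := by unfold Pre_determine_permutations_of_all_relevant_lengths; infer_instance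

def pvWitness_determine_permutations_of_all_relevant_lengths : List String × Int × Int := (["A", "B", "C"], 2, 3)

def Spec_determine_permutations_of_all_relevant_lengths (eventtypes : List String) (start_length : Int) (end_length : Int) (out : List String) : Prop := out = determine_permutations_of_all_relevant_lengths_alt eventtypes start_length end_length
instance (eventtypes : List String) (start_length : Int) (end_length : Int) (out : List String) : Decidable (Spec_determine_permutations_of_all_relevant_lengths eventtypes start_length end_length out) := by unfold Spec_determine_permutations_of_all_relevant_lengths; infer_instance

-- ===== CLAIM (what is proved, stated in full; the proofs are below) =====
def Claim_equal_determine_permutations_of_all_relevant_lengths : Prop := ∀ (eventtypes : List String) (start_length : Int) (end_length : Int), Dom_determine_permutations_of_all_relevant_lengths eventtypes start_length end_length → Pre_determine_permutations_of_all_relevant_lengths eventtypes start_length end_length → Spec_determine_permutations_of_all_relevant_lengths eventtypes start_length end_length (determine_permutations_of_all_relevant_lengths eventtypes start_length end_length)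

-- ===== LEMMAS AND PROOFS =====
-- J r xs = the joined r-combinations of xs, in A's order.
def J (r : Nat) (xs : List String) : List String :=
  (combA r xs).map (fun c => PySem.Str.join "" c)

theorem join_empty_nil : PySem.Str.join "" ([] : List String) = "" := by
  apply String.toList_inj.mp
  simp [PySem.Chars.join, List.intercalate]

theorem join_empty_cons (x : String) (c : List String) :
    PySem.Str.join "" (x :: c) = x ++ PySem.Str.join "" c := by
  apply String.toList_inj.mp
  cases c <;> simp [PySem.Chars.join, List.intercalate]

theorem J_zero (xs : List String) : J 0 xs = [""] := by
  simp [J, combA, join_empty_nil]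

theorem J_succ_nil (r : Nat) : J (r+1) [] = [] := by
  simp [J, combA]

theorem J_succ_cons (r : Nat) (x : String) (xs : List String) :
    J (r+1) (x :: xs) = (J r xs).map (fun c => x ++ c) ++ J (r+1) xs := by
  simp only [J, combA, List.map_append, List.map_map]
  congr 1
  apply List.map_congr_left
  intro c _
  simp [join_empty_cons]

theorem combA_nil_of_gt : ∀ (xs : List String) (r : Nat), xs.length < r → combA r xs = [] := by
  intro xs
  induction xs with
  | nil => intro r h; match r, h with | r+1, _ => simp [combA]
  | cons x xs ih =>
      intro r h
      match r, h with
      | r+1, h =>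
        simp only [combA, List.append_eq_nil_iff, List.map_eq_nil_iff]
        exact ⟨ih r (by simpa using h), ih (r+1) (by simp at h ⊢; omega)⟩

theorem stepRow_J (x : String) (xs : List String) :
    ∀ (k r : Nat), stepRow x (J r xs) ((List.range k).map (fun i => J (r+1+i) xs)) =
      (List.range k).map (fun i => J (r+1+i) (x :: xs)) := by
  intro k
  induction k with
  | zero => intro r; simp [stepRow]
  | succ k ih =>
      intro r
      rw [List.range_succ_eq_map]
      simp only [List.map_cons, List.map_map]
      rw [stepRow]
      have harith : ∀ i : Nat, r+1+(i+1) = (r+1)+1+i := by intro i; omega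
      have hf : ((fun i => J (r+1+i) xs) ∘ Nat.succ) = fun i => J ((r+1)+1+i) xs := by
        funext i; rw [Function.comp_apply, Nat.succ_eq_add_one, harith i]
      have hf' : ((fun i => J (r+1+i) (x::xs)) ∘ Nat.succ) = fun i => J ((r+1)+1+i) (x::xs) := by
        funext i; rw [Function.comp_apply, Nat.succ_eq_add_one, harith i]
      rw [hf, hf', ih (r+1)]
      congr 1
      rw [Nat.add_zero, J_succ_cons]

theorem table_eq (xs : List String) (m : Nat) :
    xs.reverse.foldl (fun t x => stepTable x t) ([""] :: List.replicate m []) =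
      (List.range (m+1)).map (fun r => J r xs) := by
  rw [List.foldl_reverse]
  induction xs with
  | nil =>
      rw [List.range_succ_eq_map]
      simp only [List.foldr_nil, List.map_cons, List.map_map, J_zero]
      congr 1
      have : ((fun r => J r ([] : List String)) ∘ Nat.succ) = fun _ => ([] : List String) := by
        funext r; exact J_succ_nil r
      rw [this, List.map_const']
      simp
  | cons x xs ih =>
      rw [List.foldr_cons, ih, List.range_succ_eq_map]
      simp only [List.map_cons, List.map_map]
      show stepTable x _ = _
      rw [stepTable]
      have harith : ∀ i : Nat, 0+1+i = i+1 := by intro i; omega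
      have hf : ((fun r => J r xs) ∘ Nat.succ) = fun i => J (0+1+i) xs := by
        funext i; rw [Function.comp_apply, Nat.succ_eq_add_one, harith i]
      have hf' : ((fun r => J r (x::xs)) ∘ Nat.succ) = fun i => J (0+1+i) (x::xs) := by
        funext i; rw [Function.comp_apply, Nat.succ_eq_add_one, harith i]
      rw [hf, hf', stepRow_J, J_zero, J_zero]

-- ===== VERDICT (by name: the statement is the Claim_ definition above) =====
theorem determine_permutations_of_all_relevant_lengths_spec : Claim_equal_determine_permutations_of_all_relevant_lengths := by
  intro ev s e _ hpre
  unfold Spec_determine_permutations_of_all_relevant_lengths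
  unfold determine_permutations_of_all_relevant_lengths determine_permutations_of_all_relevant_lengths_alt
  by_cases hes : e < s
  · rw [if_pos hes, PySem.List.pyRange_one_eq_nil (by omega)]
    rfl
  · rw [if_neg hes]
    dsimp only
    have hs : 0 ≤ s := by rcases hpre with h | h; exact h; omega
    set m : Nat := (min e (ev.length : Int)).toNat with hm
    have hmle : (m : Int) = min e (ev.length : Int) := by
      rw [hm]; exact Int.toNat_of_nonneg (by omega)
    rw [table_eq]
    rw [PySem.List.foldl_append_eq_flatMap, PySem.List.foldl_append_eq_flatMap]
    simp only [List.nil_append]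
    have hbig : ∀ r : Int, (ev.length : Int) < r → (combA r.toNat ev).map (fun c => PySem.Str.join "" c) = [] := by
      intro r hr
      rw [combA_nil_of_gt ev r.toNat (by omega)]
      rfl
    have hget : ∀ r : Int, r ∈ PySem.List.pyRange s ((m : Int) + 1) 1 →
        ((List.range (m+1)).map (fun r => J r ev)).getD r.toNat [] =
          (combA r.toNat ev).map (fun c => PySem.Str.join "" c) := by
      intro r hr
      rw [PySem.List.mem_pyRange_one] at hr
      rw [PySem.List.getD_map_range _ _ _ _ (by omega)]
      rfl
    have hcongr := List.flatMap_congr hget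
    rw [hcongr]
    by_cases hsm : s ≤ (m : Int) + 1
    · rw [PySem.List.pyRange_one_append s ((m:Int)+1) (e+1) hsm (by omega)]
      rw [List.flatMap_append]
      have : (PySem.List.pyRange ((m:Int)+1) (e+1) 1).flatMap
          (fun it => (combA it.toNat ev).map (fun c => PySem.Str.join "" c)) = [] := by
        rw [List.flatMap_eq_nil_iff]
        intro r hr
        rw [PySem.List.mem_pyRange_one] at hr
        exact hbig r (by omega)
      rw [this, List.append_nil]
    · have hA : (PySem.List.pyRange s (e+1) 1).flatMap
          (fun it => (combA it.toNat ev).map (fun c => PySem.Str.join "" c)) = [] := by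
        rw [List.flatMap_eq_nil_iff]
        intro r hr
        rw [PySem.List.mem_pyRange_one] at hr
        exact hbig r (by omega)
      rw [hA, PySem.List.pyRange_one_eq_nil (by omega : (m:Int)+1 ≤ s), List.flatMap_nil]
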